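-- pv_equiv track=rewrite | github.com/Arjun-Sivasankar/MasterThesis | gen/withKG/retrieval_utils.py | extract_relationship_from_fact
-- ===== SOURCE A (Python) =====
-- RELATIONSHIP_WEIGHTS = {
--     # Tier 1: Direct causal/diagnostic relationships (3.0)
--     'etiology': 3.0,
--     'may_cause': 3.0,
--     'pathology': 3.0,
--
--     # Tier 2: Strong associations (2.0-2.5)
--     'may_treat': 2.5,
--     'finding_site': 2.5,
--     'clinical_course': 2.5,
--     'associated_with': 2.0,
--     'assoc': 2.0,
--     'morphology': 2.0,
--
--     # Tier 3: Moderate associations (1.0-1.5)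
--     'location': 1.0,
--     'measurement': 1.5,
--     'procedure_method': 1.5,
--     'proc_method': 1.5,
--     'proc_site': 1.0,
--     'course': 1.0,
--
--     # Tier 4: Structural relationships (0.5-0.8)
--     'isa': 0.5,
--     'equivalent': 0.8,
--     'meta': 0.5,
--     'other': 0.5,
--
--     # Tier 5: Less diagnostic (0.3-1.2)
--     'temporal': 0.7,
--     'intent': 0.3,
--     'priority': 0.3,
--     'severity': 1.2,
--     'proc_device': 0.5,
--     'procedure_device': 0.5,
-- }
--
-- def extract_relationship_from_fact(fact: str) -> str:
--     """Extract relationship type from linearized fact (FALLBACK method)."""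
--     fact_lower = fact.lower()
--
--     if ' which ' in fact_lower:
--         fact_lower = fact_lower.split(' which ')[0]
--
--     sorted_rels = sorted(RELATIONSHIP_WEIGHTS.keys(), key=len, reverse=True)
--
--     for rel in sorted_rels:
--         if rel in fact_lower or rel.replace('_', ' ') in fact_lower:
--             return rel
--
--     return 'other'
-- ===== SOURCE B (Python) =====
-- RELATIONSHIP_WEIGHTS = {
--     'etiology': 3.0, 'may_cause': 3.0, 'pathology': 3.0,
--     'may_treat': 2.5, 'finding_site': 2.5, 'clinical_course': 2.5,
--     'associated_with': 2.0, 'assoc': 2.0, 'morphology': 2.0,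
--     'location': 1.0, 'measurement': 1.5, 'procedure_method': 1.5,
--     'proc_method': 1.5, 'proc_site': 1.0, 'course': 1.0,
--     'isa': 0.5, 'equivalent': 0.8, 'meta': 0.5, 'other': 0.5,
--     'temporal': 0.7, 'intent': 0.3, 'priority': 0.3, 'severity': 1.2,
--     'proc_device': 0.5, 'procedure_device': 0.5,
-- }
--
-- def extract_relationship_from_fact(fact: str) -> str:
--     """Extract relationship type: no sort — one strict-improvement scan in dict order."""
--     f = fact.lower()
--     i = f.find(' which ')
--     if i != -1:
--         f = f[:i]
--     best = ''
--     for rel in RELATIONSHIP_WEIGHTS: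
--         if len(best) < len(rel) and (rel in f or rel.replace('_', ' ') in f):
--             best = rel
--     return best if best else 'other'
-- ===== Notes on version B (the rewrite author's own statement) =====
-- stated objective: simpler
-- what changed: B removes the length-descending sort of the relationship keys and the first-hit loop: it truncates the fact at the which-clause separator via find+slice instead of split()[0] and does one strict-improvement scan over the dict in insertion order keeping the longest matching key (strict greater-than reproduces the stable sort's tie-breaking).
import Mathlib
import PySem

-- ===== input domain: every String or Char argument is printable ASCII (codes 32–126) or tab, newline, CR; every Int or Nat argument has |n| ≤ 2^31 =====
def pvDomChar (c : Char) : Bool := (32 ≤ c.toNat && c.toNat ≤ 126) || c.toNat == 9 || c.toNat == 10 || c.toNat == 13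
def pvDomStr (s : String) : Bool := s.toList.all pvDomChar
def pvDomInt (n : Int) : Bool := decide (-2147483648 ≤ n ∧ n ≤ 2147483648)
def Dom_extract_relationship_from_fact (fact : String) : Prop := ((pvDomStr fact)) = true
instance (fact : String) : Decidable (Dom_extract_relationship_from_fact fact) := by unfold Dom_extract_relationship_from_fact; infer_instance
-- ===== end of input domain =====

-- B drops A's length-descending sort and first-hit loop: one strict-improvement scan in dict
-- insertion order, with the which-clause truncation done by find+slice instead of split()[0];
-- simpler, same result.

-- Shared module-level context: the keys of RELATIONSHIP_WEIGHTS in insertion order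
-- (the float weights are never used by this function, so only the keys are ported).
def pvRelKeys : List String :=
  ["etiology", "may_cause", "pathology",
   "may_treat", "finding_site", "clinical_course",
   "associated_with", "assoc", "morphology",
   "location", "measurement", "procedure_method",
   "proc_method", "proc_site", "course",
   "isa", "equivalent", "meta", "other",
   "temporal", "intent", "priority", "severity",
   "proc_device", "procedure_device"]

-- ===== PORT A =====
-- 'for rel in sorted_rels: if rel in fact_lower or rel.replace('_',' ') in fact_lower: return rel'
-- then 'return "other"'
def pvLoopA (fl : List Char) : List String → String
  | [] => "other"
  | r :: rs =>
    if PySem.Chars.isIn r.toList fl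
        || PySem.Chars.isIn (PySem.Chars.replace r.toList ['_'] [' ']) fl then r
    else pvLoopA fl rs

def extract_relationship_from_fact (fact : String) : String :=
  let fact_lower := PySem.Chars.lower fact.toList
  -- "if ' which ' in fact_lower: fact_lower = fact_lower.split(' which ')[0]";
  -- [0] is safe since split always returns a nonempty list, ported as headD [].
  let fact_lower :=
    if PySem.Chars.isIn " which ".toList fact_lower then
      (PySem.Chars.splitOn fact_lower " which ".toList).headD []
    else fact_lower
  pvLoopA fact_lower (PySem.List.sorted pvRelKeys (fun r => PySem.Str.len r) true)

-- ===== PORT B =====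
-- 'i = f.find(' which '); if i != -1: f = f[:i]' then
-- 'best = ""; for rel in …: if len(best) < len(rel) and (rel in f or …): best = rel'
def extract_relationship_from_fact_alt (fact : String) : String :=
  let f := PySem.Chars.lower fact.toList
  let i := PySem.Chars.find f " which ".toList
  let f := if i ≠ -1 then PySem.Chars.slice f none (some i) else f
  let best := pvRelKeys.foldl
    (fun best rel =>
      if PySem.Str.len best < PySem.Str.len rel
          && (PySem.Chars.isIn rel.toList f
              || PySem.Chars.isIn (PySem.Chars.replace rel.toList ['_'] [' ']) f)
      then rel else best) ""
  if best ≠ "" then best else "other"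

-- ===== PRECONDITION & SPEC =====
def Spec_extract_relationship_from_fact (fact : String) (out : String) : Prop := out = extract_relationship_from_fact_alt fact
instance (fact : String) (out : String) : Decidable (Spec_extract_relationship_from_fact fact out) := by unfold Spec_extract_relationship_from_fact; infer_instance

-- ===== CLAIM (what is proved, stated in full; the proofs are below) =====
def Claim_equal_extract_relationship_from_fact : Prop := ∀ (fact : String), Dom_extract_relationship_from_fact fact → Spec_extract_relationship_from_fact fact (extract_relationship_from_fact fact)

-- ===== LEMMAS AND PROOFS =====

def pvTakeUntil (sep : List Char) : List Char → List Char
  | [] => []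
  | c :: r => if sep.isPrefixOf (c :: r) then [] else c :: pvTakeUntil sep r

theorem go_acc (sep : List Char) : ∀ (fuel : Nat) (l cur : List Char) (acc : List (List Char)) (a : List Char),
    (PySem.Chars.splitOn.go sep fuel l cur (acc ++ [a])).headD [] = a := by
  intro fuel
  induction fuel with
  | zero => intro l cur acc a; simp [PySem.Chars.splitOn.go, List.reverse_append]
  | succ fuel ih =>
    intro l cur acc a
    cases l with
    | nil => simp [PySem.Chars.splitOn.go, List.reverse_append]
    | cons c rest =>
      simp only [PySem.Chars.splitOn.go]
      split
      · have := ih (List.drop sep.length (c :: rest)) [] (List.reverse cur :: acc) a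
        simpa using this
      · exact ih rest (c :: cur) acc a

theorem go_head (sep : List Char) : ∀ (fuel : Nat) (l cur : List Char), l.length < fuel →
    (PySem.Chars.splitOn.go sep fuel l cur []).headD [] = cur.reverse ++ pvTakeUntil sep l := by
  intro fuel
  induction fuel with
  | zero => intro l cur h; omega
  | succ fuel ih =>
    intro l cur h
    cases l with
    | nil => simp [PySem.Chars.splitOn.go, pvTakeUntil]
    | cons c rest =>
      simp only [PySem.Chars.splitOn.go]
      split
      · have := go_acc sep fuel (List.drop sep.length (c :: rest)) [] [] (List.reverse cur)
        simp only [List.nil_append] at this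
        rw [this, pvTakeUntil]
        simp [*]
      · rw [ih rest (c :: cur) (by simpa using Nat.lt_of_succ_lt_succ (by simpa using h)), pvTakeUntil]
        simp [*]

theorem find_go_succ (sep : List Char) (hsep : sep ≠ []) : ∀ (l : List Char) (k : Nat),
    PySem.Chars.find.go sep l (k+1) = if PySem.Chars.find.go sep l k = -1 then -1 else PySem.Chars.find.go sep l k + 1 := by
  intro l
  induction l with
  | nil => intro k; simp [PySem.Chars.find.go, List.isEmpty_iff, hsep]
  | cons c rest ih =>
    intro k
    simp only [PySem.Chars.find.go]
    split
    · simp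
    · exact ih (k+1)

theorem takeUntil_eq_take (sep : List Char) (hsep : sep ≠ []) : ∀ (l : List Char),
    0 ≤ PySem.Chars.find l sep → pvTakeUntil sep l = l.take (PySem.Chars.find l sep).toNat := by
  intro l
  induction l with
  | nil => intro h; simp [pvTakeUntil]
  | cons c rest ih =>
    intro h
    by_cases hp : sep.isPrefixOf (c :: rest) = true
    · have : PySem.Chars.find (c :: rest) sep = 0 := by
        simp [PySem.Chars.find, PySem.Chars.find.go, hp]
      simp [pvTakeUntil, hp, this]
    · have hf : PySem.Chars.find (c :: rest) sep
          = if PySem.Chars.find rest sep = -1 then -1 else PySem.Chars.find rest sep + 1 := by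
        simp only [PySem.Chars.find]
        rw [show PySem.Chars.find.go sep (c :: rest) 0
              = PySem.Chars.find.go sep rest 1 by simp [PySem.Chars.find.go, hp]]
        exact find_go_succ sep hsep rest 0
      by_cases hr : PySem.Chars.find rest sep = -1
      · rw [hf] at h; simp [hr] at h
      · have hr0 : 0 ≤ PySem.Chars.find rest sep := by
          have := PySem.Chars.neg_one_le_find (s := rest) (sub := sep); omega
        rw [hf]; simp only [hr, if_false]
        rw [pvTakeUntil, if_neg hp, ih hr0]
        have : (PySem.Chars.find rest sep + 1).toNat = (PySem.Chars.find rest sep).toNat + 1 := by omega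
        simp [this]

theorem find_insertBy_neg {q : String → Bool} {bef : String → String → Bool} {x : String}
    (hq : q x = false) (ys : List String) :
    ((PySem.List.insertBy bef x ys).find? q) = ys.find? q := by
  induction ys with
  | nil => simp [PySem.List.insertBy, List.find?, hq]
  | cons y ys ih =>
    by_cases hb : bef x y = true
    · simp [PySem.List.insertBy, hb, List.find?, hq]
    · by_cases hy : q y = true <;>
        simp [PySem.List.insertBy, hb, List.find?, hy, ih]

theorem find_insertBy_pos {q : String → Bool} {x : String}
    (hq : q x = true) (ys : List String)
    (hys : ys.Pairwise (fun a b => PySem.Str.len b ≤ PySem.Str.len a)) :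
    ((PySem.List.insertBy (fun a b => decide (PySem.Str.len b < PySem.Str.len a)) x ys).find? q)
      = match ys.find? q with
        | none => some x
        | some a => if PySem.Str.len a < PySem.Str.len x then some x else some a := by
  induction ys with
  | nil => simp [PySem.List.insertBy, List.find?, hq]
  | cons y ys ih =>
    rcases List.pairwise_cons.mp hys with ⟨hy_all, hys'⟩
    have hcons : PySem.List.insertBy (fun a b => decide (PySem.Str.len b < PySem.Str.len a)) x (y :: ys)
        = if decide (PySem.Str.len y < PySem.Str.len x) then x :: y :: ys
          else y :: PySem.List.insertBy (fun a b => decide (PySem.Str.len b < PySem.Str.len a)) x ys := rfl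
    by_cases hb : PySem.Str.len y < PySem.Str.len x
    · rw [hcons, if_pos (by simpa using hb), List.find?_cons_of_pos hq]
      cases hfy : List.find? q (y :: ys) with
      | none => rfl
      | some a =>
        have ha : a ∈ y :: ys := List.mem_of_find?_eq_some hfy
        have hlen : PySem.Str.len a ≤ PySem.Str.len y := by
          rcases List.mem_cons.mp ha with h | h
          · exact le_of_eq (by rw [h])
          · exact hy_all a h
        show some x = if PySem.Str.len a < PySem.Str.len x then some x else some a
        rw [if_pos (lt_of_le_of_lt hlen hb)]
    · have hxy : PySem.Str.len x ≤ PySem.Str.len y := not_lt.mp hb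
      rw [hcons, if_neg (by simpa using hb)]
      by_cases hy : q y = true
      · rw [List.find?_cons_of_pos hy, List.find?_cons_of_pos hy]
        show some y = if PySem.Str.len y < PySem.Str.len x then some x else some y
        rw [if_neg (not_lt.mpr hxy)]
      · rw [List.find?_cons_of_neg hy, List.find?_cons_of_neg hy, ih hys']

-- first hit in the stable length-descending sort = insertion-order Option max-scan
theorem find_sorted_eq_optfold (q : String → Bool) (xs : List String) :
    ((PySem.List.sorted xs (fun r => PySem.Str.len r) true).find? q)
      = xs.foldl (fun best rel =>
            if q rel then
              match best with
              | none => some rel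
              | some b => if PySem.Str.len b < PySem.Str.len rel then some rel else best
            else best) none := by
  induction xs using List.reverseRecOn with
  | nil => rfl
  | append_singleton xs x ih =>
    rw [PySem.List.sorted_rev_eq_foldl_insertBy, List.foldl_append, List.foldl_append,
      ← PySem.List.sorted_rev_eq_foldl_insertBy]
    simp only [List.foldl_cons, List.foldl_nil]
    rw [← ih]
    by_cases hq : q x = true
    · rw [if_pos hq,
        find_insertBy_pos hq _ (PySem.List.sorted_pairwise_rev xs (fun r => PySem.Str.len r))]
      cases (PySem.List.sorted xs (fun r => PySem.Str.len r) true).find? q <;> rfl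
    · rw [if_neg hq, find_insertBy_neg (by simpa using hq)]

-- the ""-sentinel strict-improvement fold computes the Option max-scan
theorem strfold_eq_optfold (q : String → Bool) : ∀ (xs : List String), (∀ x ∈ xs, x ≠ "") →
    ∀ (ob : Option String), ob ≠ some "" →
    xs.foldl (fun best rel =>
        if PySem.Str.len best < PySem.Str.len rel && q rel then rel else best) (ob.getD "")
      = (xs.foldl (fun best rel =>
            if q rel then
              match best with
              | none => some rel
              | some b => if PySem.Str.len b < PySem.Str.len rel then some rel else best
            else best) ob).getD "" := by
  intro xs
  induction xs with
  | nil => intro _ ob _; rfl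
  | cons x xs ih =>
    intro hne ob hob
    have hx : x ≠ "" := hne x (by simp)
    have hxlen : 0 < x.length := by
      have hn : x.toList ≠ [] := by
        intro hn; apply hx; have := congrArg String.ofList hn; simpa using this
      simpa using List.length_pos_of_ne_nil hn
    simp only [List.foldl_cons]
    by_cases hq : q x = true
    · cases ob with
      | none =>
        rw [if_pos hq]
        simp only [Option.getD_none]
        rw [if_pos (by simp [hq]; simpa using hxlen)]
        exact ih (fun y hy => hne y (by simp [hy])) (some x) (by simpa using hx)
      | some b =>
        have hb : b ≠ "" := by simpa using hob
        rw [if_pos hq]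
        simp only [Option.getD_some]
        by_cases hlt : PySem.Str.len b < PySem.Str.len x
        · rw [if_pos (by simp only [hq, Bool.and_true, decide_eq_true_eq, PySem.Str.len_eq]; simpa using hlt), if_pos hlt]
          exact ih (fun y hy => hne y (by simp [hy])) (some x) (by simpa using hx)
        · rw [if_neg (by simp only [Bool.and_eq_true, decide_eq_true_eq, PySem.Str.len_eq]; intro h; exact hlt (by simpa using h.1)), if_neg hlt]
          exact ih (fun y hy => hne y (by simp [hy])) (some b) hob
    · have hq' : q x = false := by simpa using hq
      rw [if_neg (by simp [hq']), if_neg (by simp [hq'])]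
      exact ih (fun y hy => hne y (by simp [hy])) ob hob

theorem prep_eq (l : List Char) :
    (if PySem.Chars.isIn " which ".toList l then (PySem.Chars.splitOn l " which ".toList).headD [] else l)
      = (if PySem.Chars.find l " which ".toList ≠ -1 then
           PySem.Chars.slice l none (some (PySem.Chars.find l " which ".toList)) else l) := by
  have hsep : (" which ".toList : List Char) ≠ [] := by decide
  by_cases hin : PySem.Chars.isIn " which ".toList l = true
  · have hinf := (PySem.Chars.isIn_iff_infix _ _).mp hin
    have hf : 0 ≤ PySem.Chars.find l " which ".toList := (PySem.Chars.find_nonneg_iff _ _).mpr hinf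
    rw [if_pos hin, if_pos (by omega)]
    rw [PySem.Chars.slice_eq_listSlice, PySem.List.slice_to _ hf]
    rw [show PySem.Chars.splitOn l " which ".toList
          = PySem.Chars.splitOn.go " which ".toList (l.length + 1) l [] [] from rfl,
      go_head _ _ _ _ (by omega)]
    simpa using takeUntil_eq_take _ hsep l hf
  · have hninf : ¬ (" which ".toList <:+: l) := fun h => hin ((PySem.Chars.isIn_iff_infix _ _).mpr h)
    have hf : PySem.Chars.find l " which ".toList = -1 := (PySem.Chars.find_eq_neg_one_iff _ _).mpr hninf
    rw [if_neg hin, if_neg (by simp only [not_not]; simpa using hf)]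

theorem optfold_ne_empty (q : String → Bool) : ∀ (xs : List String), (∀ x ∈ xs, x ≠ "") →
    ∀ (ob : Option String), ob ≠ some "" →
    xs.foldl (fun best rel =>
        if q rel then
          match best with
          | none => some rel
          | some b => if PySem.Str.len b < PySem.Str.len rel then some rel else best
        else best) ob ≠ some "" := by
  intro xs
  induction xs with
  | nil => intro _ ob hob; exact hob
  | cons x xs ih =>
    intro hne ob hob
    simp only [List.foldl_cons]
    apply ih (fun y hy => hne y (by simp [hy]))
    have hx : x ≠ "" := hne x (by simp)
    by_cases hq : q x = true
    · rw [if_pos hq]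
      cases ob with
      | none => simpa using hx
      | some b =>
        have hb : b ≠ "" := by simpa using hob
        split
        · simp_all
        · split <;> simp_all
    · rw [if_neg hq]; exact hob

theorem pvLoopA_eq_find (fl : List Char) (rs : List String) :
    pvLoopA fl rs = ((rs.find? (fun r => PySem.Chars.isIn r.toList fl
        || PySem.Chars.isIn (PySem.Chars.replace r.toList ['_'] [' ']) fl)).getD "other") := by
  induction rs with
  | nil => rfl
  | cons r rs ih =>
    by_cases h : (PySem.Chars.isIn r.toList fl
        || PySem.Chars.isIn (PySem.Chars.replace r.toList ['_'] [' ']) fl) = true <;>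
      simp [pvLoopA, List.find?, h, ih]

-- ===== VERDICT (by name: the statement is the Claim_ definition above) =====
theorem extract_relationship_from_fact_spec : Claim_equal_extract_relationship_from_fact := by
  intro fact _
  unfold Spec_extract_relationship_from_fact extract_relationship_from_fact extract_relationship_from_fact_alt
  simp only []
  rw [← prep_eq (PySem.Chars.lower fact.toList)]
  set fl := (if PySem.Chars.isIn " which ".toList (PySem.Chars.lower fact.toList) then
      (PySem.Chars.splitOn (PySem.Chars.lower fact.toList) " which ".toList).headD []
    else PySem.Chars.lower fact.toList) with hfl
  set q := fun r : String => PySem.Chars.isIn r.toList fl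
      || PySem.Chars.isIn (PySem.Chars.replace r.toList ['_'] [' ']) fl with hq
  have hne : ∀ x ∈ pvRelKeys, x ≠ "" := by decide
  rw [pvLoopA_eq_find, find_sorted_eq_optfold q pvRelKeys]
  have hstr := strfold_eq_optfold q pvRelKeys hne none (by simp)
  simp only [Option.getD_none] at hstr
  rw [hstr]
  cases hopt : pvRelKeys.foldl (fun best rel =>
      if q rel then
        match best with
        | none => some rel
        | some b => if PySem.Str.len b < PySem.Str.len rel then some rel else best
      else best) none with
  | none => rfl
  | some b =>
    have hb : b ≠ "" := by
      have := optfold_ne_empty q pvRelKeys hne none (by simp)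
      rw [hopt] at this; simpa using this
    simp [hb]
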